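-- pv_equiv track=rewrite | github.com/1716285375/paper_code | scripts/add_chinese_comments.py | translate_common_comments
-- ===== SOURCE A (Python) =====
-- def translate_common_comments(text: str) -> str:
--     """翻译常见的英文注释"""
--     translations = {
--         "Args:": "参数:",
--         "Returns:": "返回:",
--         "Raises:": "抛出异常:",
--         "Note:": "注意:",
--         "Warning:": "警告:",
--         "Example:": "示例:",
--         "See also:": "另见:",
--         "TODO:": "待办:",
--         "FIXME:": "待修复:",
--     }
--
--     for eng, chn in translations.items():
--         text = text.replace(eng, chn)
--
--     return text
-- ===== SOURCE B (Python) =====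
-- def translate_common_comments(text: str) -> str:
--     """翻译常见的英文注释"""
--     translations = {
--         "Args:": "参数:",
--         "Returns:": "返回:",
--         "Raises:": "抛出异常:",
--         "Note:": "注意:",
--         "Warning:": "警告:",
--         "Example:": "示例:",
--         "See also:": "另见:",
--         "TODO:": "待办:",
--         "FIXME:": "待修复:",
--     }
--
--     out = []
--     i = 0
--     n = len(text)
--     while i < n:
--         for eng, chn in translations.items():
--             if text.startswith(eng, i):
--                 out.append(chn)
--                 i += len(eng)
--                 break
--         else:
--             out.append(text[i])
--             i += 1
--     return "".join(out)
-- ===== Notes on version B (the rewrite author's own statement) =====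
-- stated objective: alternative
-- what changed: A runs nine sequential full-string str.replace passes (one per label, each rebuilding the whole string); B makes a single left-to-right pass that at each position tries the labels in dictionary order, emitting the translation on a match and the character otherwise (valid because no label overlaps another and no translation can create a new match).
import Mathlib
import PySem

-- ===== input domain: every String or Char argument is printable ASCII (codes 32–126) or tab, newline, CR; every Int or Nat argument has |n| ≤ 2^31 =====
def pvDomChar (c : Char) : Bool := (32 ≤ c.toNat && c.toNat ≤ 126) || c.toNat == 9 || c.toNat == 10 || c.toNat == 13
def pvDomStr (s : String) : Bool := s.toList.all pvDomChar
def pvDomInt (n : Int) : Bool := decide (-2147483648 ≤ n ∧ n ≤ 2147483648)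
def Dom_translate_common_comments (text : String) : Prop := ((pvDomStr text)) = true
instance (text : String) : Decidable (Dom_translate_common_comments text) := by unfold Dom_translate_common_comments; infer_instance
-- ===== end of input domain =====

-- B replaces A's nine sequential full-string replace passes by one left-to-right scan that at
-- each position tries the labels in dictionary order (first match wins): simpler control flow,
-- a single pass over the text instead of nine.

-- ===== PORT A =====
def translate_common_comments (text : String) : String :=
  let translations : PySem.Dict String String := PySem.Dict.mk
    [("Args:", "参数:"), ("Returns:", "返回:"), ("Raises:", "抛出异常:"),
     ("Note:", "注意:"), ("Warning:", "警告:"), ("Example:", "示例:"),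
     ("See also:", "另见:"), ("TODO:", "待办:"), ("FIXME:", "待修复:")]
  translations.items.foldl (fun t p => PySem.Str.replace t p.1 p.2) text

-- ===== PORT B =====
-- B's translation table, as lists of code points
def pvPairsC : List (List Char × List Char) :=
  [("Args:".toList, "参数:".toList), ("Returns:".toList, "返回:".toList),
   ("Raises:".toList, "抛出异常:".toList), ("Note:".toList, "注意:".toList),
   ("Warning:".toList, "警告:".toList), ("Example:".toList, "示例:".toList),
   ("See also:".toList, "另见:".toList), ("TODO:".toList, "待办:".toList),
   ("FIXME:".toList, "待修复:".toList)]

-- B's single left-to-right scan (the while loop): at each position try the pairs in order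
-- (the for/else loop); on a match emit the translation and skip the label, else emit the char.
def pvScan (ks : List (List Char × List Char)) : List Char → List Char
  | [] => []
  | c :: t =>
    match ks.findSome? (fun p => if p.1.isPrefixOf (c :: t) then some p else none) with
    | some p => p.2 ++ pvScan ks (t.drop (p.1.length - 1))
    | none => c :: pvScan ks t
termination_by l => l.length
decreasing_by
  · simp only [List.length_cons, List.length_drop]; omega
  · simp

def translate_common_comments_alt (text : String) : String :=
  String.ofList (pvScan pvPairsC text.toList)

-- ===== PRECONDITION & SPEC =====
def Spec_translate_common_comments (text : String) (out : String) : Prop := out = translate_common_comments_alt text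
instance (text : String) (out : String) : Decidable (Spec_translate_common_comments text out) := by unfold Spec_translate_common_comments; infer_instance

-- ===== CLAIM (what is proved, stated in full; the proofs are below) =====
def Claim_equal_translate_common_comments : Prop := ∀ (text : String), Dom_translate_common_comments text → Spec_translate_common_comments text (translate_common_comments text)

-- ===== LEMMAS AND PROOFS =====

lemma pvScan_nil (cs : List Char) : pvScan [] cs = cs := by
  induction cs with
  | nil => rw [pvScan]
  | cons c t ih => rw [pvScan]; simp [ih]

lemma pvScan_cons_none (ks : List (List Char × List Char)) (c : Char) (t : List Char)
    (hf : ∀ p ∈ ks, ¬ p.1 <+: c :: t) :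
    pvScan ks (c :: t) = c :: pvScan ks t := by
  rw [pvScan]
  have : ks.findSome? (fun p => if p.1.isPrefixOf (c :: t) then some p else none) = none := by
    rw [List.findSome?_eq_none_iff]
    intro p hp
    simp [List.isPrefixOf_iff_prefix, hf p hp]
  rw [this]

lemma pvScan_cons_some (ks : List (List Char × List Char)) (c : Char) (t : List Char)
    (q : List (Char) × List Char)
    (hf : ks.findSome? (fun p => if p.1.isPrefixOf (c :: t) then some p else none) = some q) :
    pvScan ks (c :: t) = q.2 ++ pvScan ks (t.drop (q.1.length - 1)) := by
  rw [pvScan, hf]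

def pvRepl (k v : List Char) : List Char → List Char
  | [] => []
  | c :: t =>
    if k.isPrefixOf (c :: t) then v ++ pvRepl k v (t.drop (k.length - 1))
    else c :: pvRepl k v t
termination_by l => l.length
decreasing_by
  · simp only [List.length_cons, List.length_drop]; omega
  · simp

lemma pvReplace_go_eq (k v : List Char) (hk : k ≠ []) :
    ∀ fuel l acc, l.length ≤ fuel →
      PySem.Chars.replace.go k v fuel l acc = acc.reverse ++ pvRepl k v l := by
  intro fuel
  induction fuel with
  | zero =>
    intro l acc hl
    have : l = [] := List.length_eq_zero_iff.mp (Nat.le_zero.mp hl)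
    subst this
    simp [PySem.Chars.replace.go, pvRepl]
  | succ n ih =>
    intro l acc hl
    match l with
    | [] => simp [PySem.Chars.replace.go, pvRepl]
    | c :: t =>
      rw [PySem.Chars.replace.go]
      by_cases hp : k.isPrefixOf (c :: t)
      · have hk1 : 1 ≤ k.length := by
          cases k with
          | nil => exact absurd rfl hk
          | cons a b => simp
        have hdrop : List.drop k.length (c :: t) = t.drop (k.length - 1) := by
          cases hklen : k.length with
          | zero => omega
          | succ m => simp
        rw [if_pos hp, pvRepl, if_pos hp, ih _ _ (by simp only [List.length_drop, List.length_cons]; simp only [List.length_cons] at hl; omega), hdrop]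
        simp
      · rw [if_neg hp, pvRepl, if_neg hp, ih]
        · simp
        · simp at hl; omega

lemma pvReplace_eq (k v cs : List Char) (hk : k ≠ []) :
    PySem.Chars.replace cs k v = pvRepl k v cs := by
  rw [PySem.Chars.replace]
  rw [if_neg (by simp [List.isEmpty_iff, hk])]
  simpa using pvReplace_go_eq k v hk cs.length cs [] le_rfl

lemma pvPrefix_cases {u a b : List Char} (h : u <+: a ++ b) : u <+: a ∨ a <+: u :=
  List.prefix_or_prefix_of_prefix h (List.prefix_append a b)

lemma pvP (k v : List Char) (ks : List (List Char × List Char))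
    (hsufv : ∀ p ∈ ks, ∀ i < p.1.length, ¬ p.1.drop i <+: v ∧ ¬ v <+: p.1.drop i) :
    ∀ (cs u : List Char), (∃ p ∈ ks, u <:+ p.1) → u <+: pvRepl k v cs → u <+: cs := by
  intro cs
  induction cs using pvRepl.induct (k := k) with
  | case1 => intro u _ h; rw [pvRepl] at h; simpa using h
  | case2 c t hp ih =>
    intro u hsuf h
    rw [pvRepl, if_pos hp] at h
    rcases u with _ | ⟨x, u'⟩
    · exact List.nil_prefix
    · exfalso
      obtain ⟨p, hpks, hsfx⟩ := hsuf
      have hlen : (x :: u').length ≤ p.1.length := hsfx.length_le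
      have hEq : x :: u' = p.1.drop (p.1.length - (x :: u').length) :=
        List.suffix_iff_eq_drop.mp hsfx
      have hi : p.1.length - (x :: u').length < p.1.length := by
        simp only [List.length_cons] at hlen ⊢; omega
      have hcond := hsufv p hpks _ hi
      rcases pvPrefix_cases h with h1 | h1
      · exact hcond.1 (hEq ▸ h1)
      · exact hcond.2 (hEq ▸ h1)
  | case3 c t hp ih =>
    intro u hsuf h
    rw [pvRepl, if_neg hp] at h
    rcases u with _ | ⟨x, u'⟩
    · exact List.nil_prefix
    · obtain ⟨r, hr⟩ := h
      injection hr with h1 h2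
      subst h1
      have hu' : u' <+: pvRepl k v t := ⟨r, h2⟩
      have hsuf' : ∃ p ∈ ks, u' <:+ p.1 := by
        obtain ⟨p, hpks, hsfx⟩ := hsuf
        exact ⟨p, hpks, (List.suffix_cons x u').trans hsfx⟩
      have := ih u' hsuf' hu'
      exact List.cons_prefix_cons.mpr ⟨rfl, this⟩

lemma pvScan_append_inert (ks : List (List Char × List Char)) (v ys : List Char)
    (hvq : ∀ p ∈ ks, ∀ j < v.length, ¬ p.1 <+: v.drop j ∧ ¬ v.drop j <+: p.1) :
    pvScan ks (v ++ ys) = v ++ pvScan ks ys := by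
  induction v with
  | nil => simp
  | cons c v' ih =>
    have h0 : ∀ p ∈ ks, ¬ p.1 <+: (c :: v') ++ ys := by
      intro p hp h
      have hc := hvq p hp 0 (by simp)
      rcases pvPrefix_cases h with h1 | h1
      · exact hc.1 (by simpa using h1)
      · exact hc.2 (by simpa using h1)
    rw [List.cons_append, pvScan_cons_none ks c (v' ++ ys) (by simpa using h0)]
    rw [ih (fun p hp j hj => by simpa using hvq p hp (j + 1) (by simpa using hj))]
    simp

lemma pvFind_shift (xs Y : List Char) (q : List Char × List Char) :
    ∀ ks : List (List Char × List Char),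
      ks.findSome? (fun p => if p.1.isPrefixOf xs then some p else none) = some q →
      q ∈ ks ∧ q.1 <+: xs ∧
        (List.Pairwise (fun p p' => ¬ p'.1 <+: p.1) ks →
          ks.findSome? (fun p => if p.1.isPrefixOf (q.1 ++ Y) then some p else none) = some q) := by
  intro ks
  induction ks with
  | nil => intro h; simp at h
  | cons p0 ks ih =>
    intro h
    rw [List.findSome?_cons] at h
    by_cases hp0 : p0.1.isPrefixOf xs
    · rw [if_pos hp0] at h
      simp only [Option.some.injEq] at h
      subst h
      refine ⟨List.mem_cons_self .., List.isPrefixOf_iff_prefix.mp hp0, fun _ => ?_⟩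
      rw [List.findSome?_cons, if_pos (by simp [List.isPrefixOf_iff_prefix])]
    · rw [if_neg hp0] at h
      simp only at h
      obtain ⟨hmem, hpre, hrest⟩ := ih h
      refine ⟨List.mem_cons_of_mem _ hmem, hpre, fun hpair => ?_⟩
      rw [List.findSome?_cons, if_neg ?_, hrest (List.Pairwise.sublist (List.sublist_cons_self ..) hpair)]
      · intro hcon
        rcases pvPrefix_cases (List.isPrefixOf_iff_prefix.mp hcon) with h1 | h1
        · exact hp0 (List.isPrefixOf_iff_prefix.mpr (h1.trans hpre))
        · exact ((List.pairwise_cons.mp hpair).1 q hmem) h1  -- pairwise head: ¬ q.1 <+: p0.1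
      -- note direction check

lemma pvRepl_split (k v : List Char) :
    ∀ (m : Nat) (cs : List Char), m ≤ cs.length → (∀ j < m, ¬ k <+: cs.drop j) →
      pvRepl k v cs = cs.take m ++ pvRepl k v (cs.drop m) := by
  intro m
  induction m with
  | zero => intro cs _ _; simp
  | succ n ih =>
    intro cs hm hj
    match cs with
    | [] => simp at hm
    | c :: t =>
      have h0 : ¬ k <+: c :: t := by simpa using hj 0 (by omega)
      rw [pvRepl, if_neg (by simpa [List.isPrefixOf_iff_prefix] using h0)]
      rw [ih t (by simpa using hm) (fun j hjn => by simpa using hj (j + 1) (by omega))]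
      simp

lemma pvStep (k v : List Char) (ks : List (List Char × List Char))
    (hk : k ≠ []) (hkeys : ∀ p ∈ ks, p.1 ≠ [])
    (hsufv : ∀ p ∈ ks, ∀ i < p.1.length, ¬ p.1.drop i <+: v ∧ ¬ v <+: p.1.drop i)
    (hvq : ∀ p ∈ ks, ∀ j < v.length, ¬ p.1 <+: v.drop j ∧ ¬ v.drop j <+: p.1)
    (hqk : ∀ p ∈ ks, ∀ t < p.1.length, 0 < t → ¬ k <+: p.1.drop t ∧ ¬ p.1.drop t <+: k)
    (hpair : List.Pairwise (fun p p' => ¬ p'.1 <+: p.1) ks) :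
    ∀ cs, pvScan ((k, v) :: ks) cs = pvScan ks (pvRepl k v cs) := by
  suffices H : ∀ n cs, cs.length ≤ n → pvScan ((k, v) :: ks) cs = pvScan ks (pvRepl k v cs) by
    exact fun cs => H cs.length cs le_rfl
  intro n
  induction n with
  | zero =>
    intro cs hcs
    have : cs = [] := List.length_eq_zero_iff.mp (Nat.le_zero.mp hcs)
    subst this
    rw [pvRepl, pvScan, pvScan]
  | succ n ih =>
    intro cs hcs
    match cs with
    | [] => rw [pvRepl, pvScan, pvScan]
    | c :: t =>
      have hk1 : 1 ≤ k.length := List.length_pos_iff.mpr hk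
      by_cases hA : k.isPrefixOf (c :: t)
      · -- the head key matches: both sides emit v and continue after the label
        have hL : pvScan ((k, v) :: ks) (c :: t)
            = v ++ pvScan ((k, v) :: ks) (t.drop (k.length - 1)) := by
          exact pvScan_cons_some _ c t (k, v) (by rw [List.findSome?_cons, if_pos hA])
        rw [hL, pvRepl, if_pos hA]
        rw [pvScan_append_inert ks v _ hvq]
        rw [ih _ (by simp only [List.length_drop]; simp only [List.length_cons] at hcs; omega)]
      · rcases hfind : ks.findSome? (fun p => if p.1.isPrefixOf (c :: t) then some p else none)
          with _ | q
        · -- no key matches here: both sides keep the character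
          have hnone : ∀ p ∈ ((k, v) :: ks), ¬ p.1 <+: c :: t := by
            intro p hp
            rcases List.mem_cons.mp hp with h | h
            · subst h; simpa [List.isPrefixOf_iff_prefix] using hA
            · have := List.findSome?_eq_none_iff.mp hfind p h
              simp only [ite_eq_right_iff] at this
              intro hcon
              exact Option.some_ne_none p (this (List.isPrefixOf_iff_prefix.mpr hcon))
          rw [pvScan_cons_none _ _ _ hnone, pvRepl, if_neg hA]
          have hnone' : ∀ p ∈ ks, ¬ p.1 <+: c :: pvRepl k v t := by
            intro p hp hcon
            have : c :: pvRepl k v t = pvRepl k v (c :: t) := by rw [pvRepl, if_neg hA]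
            rw [this] at hcon
            exact hnone p (List.mem_cons_of_mem _ hp)
              (pvP k v ks hsufv (c :: t) p.1 ⟨p, hp, List.suffix_refl _⟩ hcon)
          rw [pvScan_cons_none _ _ _ hnone']
          have hiht : pvScan ((k, v) :: ks) t = pvScan ks (pvRepl k v t) :=
            ih t (by simp only [List.length_cons] at hcs; omega)
          rw [hiht]
        · -- a later key q matches first
          obtain ⟨hqmem, hqpre, hshift⟩ :=
            pvFind_shift (c :: t) (pvRepl k v ((c :: t).drop q.1.length)) q ks hfind
          have hq1 : q.1 ≠ [] := hkeys q hqmem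
          have hq1len : 1 ≤ q.1.length := List.length_pos_iff.mpr hq1
          have hqlen : q.1.length ≤ (c :: t).length := hqpre.length_le
          -- LHS
          have hL : pvScan ((k, v) :: ks) (c :: t)
              = q.2 ++ pvScan ((k, v) :: ks) (t.drop (q.1.length - 1)) := by
            apply pvScan_cons_some
            rw [List.findSome?_cons, if_neg hA, hfind]
          -- RHS: split the replacement around the prefix q.1
          have hsplit : pvRepl k v (c :: t)
              = q.1 ++ pvRepl k v ((c :: t).drop q.1.length) := by
            have hnostart : ∀ j < q.1.length, ¬ k <+: (c :: t).drop j := by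
              intro j hj hcon
              rcases Nat.eq_zero_or_pos j with hj0 | hj0
              · subst hj0
                simp only [List.drop_zero] at hcon
                exact hA (List.isPrefixOf_iff_prefix.mpr hcon)
              · obtain ⟨rest, hrest⟩ := hqpre
                have : (c :: t).drop j = q.1.drop j ++ rest := by
                  rw [← hrest, List.drop_append_of_le_length (by omega)]
                rw [this] at hcon
                have hc := hqk q hqmem j hj hj0
                rcases pvPrefix_cases hcon with h1 | h1
                · exact hc.1 h1
                · exact hc.2 h1
            have := pvRepl_split k v q.1.length (c :: t) hqlen hnostart
            rwa [← List.prefix_iff_eq_take.mp hqpre] at this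
          rw [hL, hsplit]
          have hdrop : (c :: t).drop q.1.length = t.drop (q.1.length - 1) := by
            cases hql : q.1.length with
            | zero => omega
            | succ m => simp
          have hX : pvScan ks (pvRepl k v ((c :: t).drop q.1.length))
              = pvScan ((k, v) :: ks) ((c :: t).drop q.1.length) :=
            (ih ((c :: t).drop q.1.length)
              (by simp only [List.length_drop]; simp only [List.length_cons] at hcs ⊢; omega)).symm
          have hfind2 := hshift hpair
          obtain ⟨q0, qt, hq⟩ : ∃ q0 qt, q.1 = q0 :: qt := by
            cases hqq : q.1 with
            | nil => exact absurd hqq hq1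
            | cons a b => exact ⟨a, b, rfl⟩
          rw [hq] at hdrop hX hfind2 ⊢
          rw [List.cons_append] at hfind2 ⊢
          rw [pvScan_cons_some ks q0 (qt ++ pvRepl k v ((c :: t).drop (q0 :: qt).length)) q hfind2]
          rw [hq]
          simp only [List.length_cons, Nat.add_sub_cancel]
          simp only [List.length_cons, Nat.add_sub_cancel] at hX hdrop
          rw [List.drop_left, hX, hdrop]

lemma pvMain (cs : List Char) : pvScan pvPairsC cs = pvRepl "FIXME:".toList "待修复:".toList (pvRepl "TODO:".toList "待办:".toList (pvRepl "See also:".toList "另见:".toList (pvRepl "Example:".toList "示例:".toList (pvRepl "Warning:".toList "警告:".toList (pvRepl "Note:".toList "注意:".toList (pvRepl "Raises:".toList "抛出异常:".toList (pvRepl "Returns:".toList "返回:".toList (pvRepl "Args:".toList "参数:".toList (cs))))))))) := by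
  have h0 : pvPairsC = [("Args:".toList, "参数:".toList), ("Returns:".toList, "返回:".toList), ("Raises:".toList, "抛出异常:".toList), ("Note:".toList, "注意:".toList), ("Warning:".toList, "警告:".toList), ("Example:".toList, "示例:".toList), ("See also:".toList, "另见:".toList), ("TODO:".toList, "待办:".toList), ("FIXME:".toList, "待修复:".toList)] := rfl
  rw [h0]
  rw [pvStep "Args:".toList "参数:".toList [("Returns:".toList, "返回:".toList), ("Raises:".toList, "抛出异常:".toList), ("Note:".toList, "注意:".toList), ("Warning:".toList, "警告:".toList), ("Example:".toList, "示例:".toList), ("See also:".toList, "另见:".toList), ("TODO:".toList, "待办:".toList), ("FIXME:".toList, "待修复:".toList)] (by decide) (by decide) (by decide) (by decide) (by decide) (by decide)]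
  rw [pvStep "Returns:".toList "返回:".toList [("Raises:".toList, "抛出异常:".toList), ("Note:".toList, "注意:".toList), ("Warning:".toList, "警告:".toList), ("Example:".toList, "示例:".toList), ("See also:".toList, "另见:".toList), ("TODO:".toList, "待办:".toList), ("FIXME:".toList, "待修复:".toList)] (by decide) (by decide) (by decide) (by decide) (by decide) (by decide)]
  rw [pvStep "Raises:".toList "抛出异常:".toList [("Note:".toList, "注意:".toList), ("Warning:".toList, "警告:".toList), ("Example:".toList, "示例:".toList), ("See also:".toList, "另见:".toList), ("TODO:".toList, "待办:".toList), ("FIXME:".toList, "待修复:".toList)] (by decide) (by decide) (by decide) (by decide) (by decide) (by decide)]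
  rw [pvStep "Note:".toList "注意:".toList [("Warning:".toList, "警告:".toList), ("Example:".toList, "示例:".toList), ("See also:".toList, "另见:".toList), ("TODO:".toList, "待办:".toList), ("FIXME:".toList, "待修复:".toList)] (by decide) (by decide) (by decide) (by decide) (by decide) (by decide)]
  rw [pvStep "Warning:".toList "警告:".toList [("Example:".toList, "示例:".toList), ("See also:".toList, "另见:".toList), ("TODO:".toList, "待办:".toList), ("FIXME:".toList, "待修复:".toList)] (by decide) (by decide) (by decide) (by decide) (by decide) (by decide)]
  rw [pvStep "Example:".toList "示例:".toList [("See also:".toList, "另见:".toList), ("TODO:".toList, "待办:".toList), ("FIXME:".toList, "待修复:".toList)] (by decide) (by decide) (by decide) (by decide) (by decide) (by decide)]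
  rw [pvStep "See also:".toList "另见:".toList [("TODO:".toList, "待办:".toList), ("FIXME:".toList, "待修复:".toList)] (by decide) (by decide) (by decide) (by decide) (by decide) (by decide)]
  rw [pvStep "TODO:".toList "待办:".toList [("FIXME:".toList, "待修复:".toList)] (by decide) (by decide) (by decide) (by decide) (by decide) (by decide)]
  rw [pvStep "FIXME:".toList "待修复:".toList [] (by decide) (by decide) (by decide) (by decide) (by decide) (by decide)]
  rw [pvScan_nil]

-- ===== VERDICT (by name: the statement is the Claim_ definition above) =====
theorem translate_common_comments_spec : Claim_equal_translate_common_comments := by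
  intro text _
  unfold Spec_translate_common_comments
  apply String.toList_inj.mp
  simp only [translate_common_comments_alt, String.toList_ofList, pvMain]
  simp only [translate_common_comments, List.foldl_cons, List.foldl_nil, PySem.Str.toList_replace]
  rw [pvReplace_eq "FIXME:".toList "待修复:".toList _ (by decide)]
  rw [pvReplace_eq "TODO:".toList "待办:".toList _ (by decide)]
  rw [pvReplace_eq "See also:".toList "另见:".toList _ (by decide)]
  rw [pvReplace_eq "Example:".toList "示例:".toList _ (by decide)]
  rw [pvReplace_eq "Warning:".toList "警告:".toList _ (by decide)]
  rw [pvReplace_eq "Note:".toList "注意:".toList _ (by decide)]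
  rw [pvReplace_eq "Raises:".toList "抛出异常:".toList _ (by decide)]
  rw [pvReplace_eq "Returns:".toList "返回:".toList _ (by decide)]
  rw [pvReplace_eq "Args:".toList "参数:".toList _ (by decide)]
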